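-- pv_equiv track=rewrite | github.com/pypi-data/pypi-mirror-136 | packages/halmoney/halmoney-1.0.0-py3-none-any.whl/halmoney/youtil.py | write_sheet_line_1
-- ===== SOURCE A (Python) =====
-- def write_sheet_line_1 (data, number = 1,input_data=[]):
-- 	#리스트에 일정한 간격으로 자료삽입
-- 	total_number = len(data)
-- 	dd=0
-- 	for a in range(len(data)):
-- 		if a%number == 0 and a!=0:
-- 			if total_number!=a:
-- 				data.insert(dd,input_data)
-- 				dd=dd+1
-- 		dd=dd+1
-- 	return data
-- ===== SOURCE B (Python) =====
-- def write_sheet_line_1(data, number=1, input_data=[]):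
--     # two-pass: compute insertion positions over the original indices,
--     # then splice in place from the back so earlier positions stay valid
--     marks = [i for i in range(len(data)) if i % number == 0 and i != 0]
--     for m in reversed(marks):
--         data.insert(m, input_data)
--     return data
-- ===== Notes on version B (the rewrite author's own statement) =====
-- stated objective: simpler
-- what changed: A interleaves insertion with the scan, tracking a running write offset dd; B first computes the list of original insertion indices with one comprehension, then splices the marker in place from the back so no offset bookkeeping is needed.
import Mathlib
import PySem

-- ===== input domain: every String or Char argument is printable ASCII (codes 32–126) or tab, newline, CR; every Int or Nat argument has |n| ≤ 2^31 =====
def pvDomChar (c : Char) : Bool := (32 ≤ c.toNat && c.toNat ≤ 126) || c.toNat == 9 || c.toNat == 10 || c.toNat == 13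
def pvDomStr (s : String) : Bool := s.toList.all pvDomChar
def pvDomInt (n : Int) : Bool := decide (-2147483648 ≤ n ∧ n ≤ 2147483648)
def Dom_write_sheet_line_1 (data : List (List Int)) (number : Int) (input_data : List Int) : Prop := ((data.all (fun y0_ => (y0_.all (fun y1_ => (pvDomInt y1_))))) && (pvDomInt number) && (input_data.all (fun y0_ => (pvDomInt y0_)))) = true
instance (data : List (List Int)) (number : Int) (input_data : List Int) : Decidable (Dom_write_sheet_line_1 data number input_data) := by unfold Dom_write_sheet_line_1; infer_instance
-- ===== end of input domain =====

-- B replaces A's single forward pass with a running offset by a two-pass shape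
-- (precompute the original insertion indices, then splice from the back); objective: simpler.
-- A mutates `data` in place and returns it; B performs the same in-place mutation in Python;
-- the Lean equivalence is about the returned list.

-- ===== PORT A =====
def write_sheet_line_1 (data : List (List Int)) (number : Int) (input_data : List Int) : List (List Int) :=
  let total_number : Int := data.length
  let st := (PySem.List.pyRange 0 total_number 1).foldl
    (fun (st : List (List Int) × Int) a =>
      if PySem.Int.mod a number = 0 ∧ a ≠ 0 then
        if total_number ≠ a then
          (PySem.List.insert st.1 st.2 input_data, st.2 + 1 + 1)
        else (st.1, st.2 + 1)
      else (st.1, st.2 + 1)) (data, 0)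
  st.1

-- ===== PORT B =====
def write_sheet_line_1_alt (data : List (List Int)) (number : Int) (input_data : List Int) : List (List Int) :=
  let marks := (PySem.List.pyRange 0 (data.length : Int) 1).filter
    (fun i => decide (PySem.Int.mod i number = 0 ∧ i ≠ 0))
  marks.reverse.foldl (fun acc m => PySem.List.insert acc m input_data) data

-- ===== PRECONDITION & SPEC =====
-- Pre_ excludes number = 0, on which Python A raises ZeroDivisionError ('a % number'); B raises there too.
def Pre_write_sheet_line_1 (data : List (List Int)) (number : Int) (input_data : List Int) : Prop := number ≠ 0
instance (data : List (List Int)) (number : Int) (input_data : List Int) : Decidable (Pre_write_sheet_line_1 data number input_data) := by unfold Pre_write_sheet_line_1; infer_instance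

def pvWitness_write_sheet_line_1 : List (List Int) × Int × List Int := ([[1], [2], [3], [4], [5]], 2, [0])

def Spec_write_sheet_line_1 (data : List (List Int)) (number : Int) (input_data : List Int) (out : List (List Int)) : Prop := out = write_sheet_line_1_alt data number input_data
instance (data : List (List Int)) (number : Int) (input_data : List Int) (out : List (List Int)) : Decidable (Spec_write_sheet_line_1 data number input_data out) := by unfold Spec_write_sheet_line_1; infer_instance

-- ===== CLAIM (what is proved, stated in full; the proofs are below) =====
def Claim_equal_write_sheet_line_1 : Prop := ∀ (data : List (List Int)) (number : Int) (input_data : List Int), Dom_write_sheet_line_1 data number input_data → Pre_write_sheet_line_1 data number input_data → Spec_write_sheet_line_1 data number input_data (write_sheet_line_1 data number input_data)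

-- ===== LEMMAS AND PROOFS =====

-- descending-order insertion of `ms` into `d` (what B's reverse foldl computes)
def insDesc (v : List Int) (ms : List Int) (d : List (List Int)) : List (List Int) :=
  ms.foldr (fun m acc => PySem.List.insert acc m v) d

theorem length_insDesc (v : List Int) (ms : List Int) (d : List (List Int)) :
    (insDesc v ms d).length = d.length + ms.length := by
  induction ms with
  | nil => simp [insDesc]
  | cons m ms ih => simp only [insDesc, List.foldr_cons, PySem.List.length_insert, List.length_cons] at *; omega

theorem pv_takeDrop (X : List (List Int)) (v : List Int) (p q : Nat) (hpq : p ≤ q) (hq : q ≤ X.length) :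
    List.take p (List.take q X ++ v :: List.drop q X) ++ v :: List.drop p (List.take q X ++ v :: List.drop q X) =
    List.take (q + 1) (List.take p X ++ v :: List.drop p X) ++
      v :: List.drop (q + 1) (List.take p X ++ v :: List.drop p X) := by
  have hp' : p ≤ (List.take q X).length := by simp; omega
  have hpl : p ≤ X.length := le_trans hpq hq
  rw [List.take_append_of_le_length hp', List.drop_append_of_le_length hp',
      List.take_append, List.drop_append, List.take_take, List.drop_take]
  simp [hpq, hpl]
  have e1 : q + 1 - p = (q - p) + 1 := by omega
  have h4 : List.take (q+1) (List.take p X) = List.take p X := by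
    rw [List.take_take]; congr 1; omega
  have h5 : List.drop (q+1) (List.take p X) = ([] : List (List Int)) :=
    List.drop_eq_nil_of_le (by simp; omega)
  have e3 : p + (q - p) = q := by omega
  rw [e1, h4, h5, List.take_succ_cons, List.drop_succ_cons, List.drop_drop, e3]
  simp

-- two inserts commute when the lower index goes second / shifts by one
theorem insert_swap (X : List (List Int)) (v : List Int) (i j : Int)
    (hi : 0 ≤ i) (hij : i ≤ j) (hj : j ≤ (X.length : Int)) :
    PySem.List.insert (PySem.List.insert X j v) i v
      = PySem.List.insert (PySem.List.insert X i v) (j + 1) v := by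
  obtain ⟨p, rfl⟩ := Int.eq_ofNat_of_zero_le hi
  obtain ⟨q, rfl⟩ := Int.eq_ofNat_of_zero_le (le_trans hi hij)
  have hpq : p ≤ q := by exact_mod_cast hij
  have hq : q ≤ X.length := by exact_mod_cast hj
  have h1 : (q:Int) + 1 = ((q+1 : Nat) : Int) := by push_cast; ring
  rw [PySem.List.insert_natCast X q v hq, PySem.List.insert_natCast X p v (le_trans hpq hq), h1,
      PySem.List.insert_natCast _ p v (by simp; omega),
      PySem.List.insert_natCast _ (q+1) v (by simp; omega)]
  exact pv_takeDrop X v p q hpq hq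

-- key lemma: inserting at n (shifted past the earlier inserts) commutes to the inside
theorem insert_insDesc (v : List Int) :
    ∀ (ms : List Int) (d : List (List Int)) (n : Int),
      (∀ m ∈ ms, 0 ≤ m ∧ m < n) → n ≤ (d.length : Int) →
      PySem.List.insert (insDesc v ms d) (n + ms.length) v
        = insDesc v ms (PySem.List.insert d n v) := by
  intro ms
  induction ms with
  | nil => intro d n _ _; simp [insDesc]
  | cons m ms ih =>
    intro d n hmem hn
    have hm := hmem m (List.mem_cons_self ..)
    have hlen : (insDesc v ms d).length = d.length + ms.length := length_insDesc v ms d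
    have hswap := insert_swap (insDesc v ms d) v m (n + ms.length) hm.1
      (by have := hm.2; omega) (by rw [hlen]; push_cast; omega)
    simp only [insDesc, List.foldr_cons] at *
    have hcast : n + ((m :: ms).length : Int) = (n + ms.length) + 1 := by
      simp only [List.length_cons]
      push_cast
      ring
    rw [hcast, ← hswap, ih d n (fun x hx => hmem x (List.mem_cons_of_mem m hx)) hn]

-- loop invariant for A's fold over the first n indices
theorem loopA_invariant (data : List (List Int)) (number : Int) (v : List Int) :
    ∀ (n : Nat), n ≤ data.length →
      ((PySem.List.pyRange 0 (n : Int) 1).foldl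
        (fun (st : List (List Int) × Int) a =>
          if PySem.Int.mod a number = 0 ∧ a ≠ 0 then
            if (data.length : Int) ≠ a then
              (PySem.List.insert st.1 st.2 v, st.2 + 1 + 1)
            else (st.1, st.2 + 1)
          else (st.1, st.2 + 1)) (data, 0))
      = (insDesc v ((PySem.List.pyRange 0 (n : Int) 1).filter
            (fun i => decide (PySem.Int.mod i number = 0 ∧ i ≠ 0))) data,
         (n : Int) + ((PySem.List.pyRange 0 (n : Int) 1).filter
            (fun i => decide (PySem.Int.mod i number = 0 ∧ i ≠ 0))).length) := by
  intro n
  induction n with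
  | zero => intro _; simp [insDesc, PySem.List.pyRange_one_eq_nil]
  | succ n ih =>
    intro hn1
    have hn : n ≤ data.length := by omega
    have hcast : ((n + 1 : Nat) : Int) = (n : Int) + 1 := by push_cast; ring
    rw [hcast, PySem.List.pyRange_one_succ_right (by positivity),
        List.foldl_append, List.filter_append, ih hn]
    by_cases hc : PySem.Int.mod (n : Int) number = 0 ∧ (n : Int) ≠ 0
    · have hne : (data.length : Int) ≠ (n : Int) := by
        have : n < data.length := by omega
        omega
      have hmem : ∀ m ∈ (PySem.List.pyRange 0 (n : Int) 1).filter
          (fun i => decide (PySem.Int.mod i number = 0 ∧ i ≠ 0)), 0 ≤ m ∧ m < (n : Int) := by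
        intro m hm
        have := PySem.List.mem_pyRange_one.mp (List.mem_of_mem_filter hm)
        exact ⟨this.1, this.2⟩
      have hkey := insert_insDesc v _ data (n : Int) hmem (by exact_mod_cast hn)
      have hd : decide (PySem.Int.mod (n:Int) number = 0 ∧ (n:Int) ≠ 0) = true := by
        simpa using hc
      simp only [List.foldl_cons, List.foldl_nil, List.filter_cons, List.filter_nil,
        if_pos hc, if_pos hne, hd, if_true, Prod.mk.injEq]
      constructor
      · rw [hkey]; simp [insDesc]
      · simp [List.length_append]; ring
    · have hd : decide (PySem.Int.mod (n:Int) number = 0 ∧ (n:Int) ≠ 0) = false := by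
        simpa using hc
      simp only [List.foldl_cons, List.foldl_nil, List.filter_cons, List.filter_nil,
        if_neg hc, hd, if_false, List.append_nil, Prod.mk.injEq, Bool.false_eq_true]
      constructor
      · simp
      · ring

-- ===== VERDICT (by name: the statement is the Claim_ definition above) =====
theorem write_sheet_line_1_spec : Claim_equal_write_sheet_line_1 := by
  intro data number input_data _ _
  unfold Spec_write_sheet_line_1 write_sheet_line_1 write_sheet_line_1_alt
  dsimp only
  rw [loopA_invariant data number input_data data.length le_rfl]
  rw [List.foldl_reverse]
  rfl
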